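-- pv_equiv track=rewrite | github.com/whitebluecloud/padp_ko | tasks/10th/js.py | self_frog_jump
-- ===== SOURCE A (Python) =====
-- def fibo_dp(n):
--     if n==0:
--         return 0
--     if n==1 or n==2:
--         return 1
--     return fibo_dp(n-1) + fibo_dp(n-2)
--
-- def fibo_max_func(A, fibo_array):
--     for i in range(len(fibo_array)):
--         if A[fibo_array[i]-1] == 1:
--             return A[fibo_array[i]:]
--
-- def self_frog_jump(A, count):
--     i=0
--     while fibo_dp(i) < len(A):
--         i+=1
--         if fibo_dp(i) == len(A): i+=1
--
--     fibo_array = [fibo_dp(i) for i in range(0,i)]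
--     fibo_array.reverse()
--     next_A = fibo_max_func(A, fibo_array)
--     if next_A is None:
--         return count+1
--     elif next_A == -1: return -1
--     elif next_A == 1: return 1
--     else:
--         count += 1
--         return self_frog_jump(next_A, count)
-- ===== SOURCE B (Python) =====
-- def self_frog_jump(A, count):
--     # Iterative: fibs built by addition (no exponential recursion), while-loop instead of self-recursion.
--     while True:
--         n = len(A)
--         fibs = []
--         a, b = 1, 2
--         while a <= n:
--             fibs.append(a)
--             a, b = b, a + b
--         f = next((f for f in reversed(fibs) if A[f - 1] == 1), None)
--         if f is None:
--             return count + 1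
--         A = A[f:]
--         count += 1
-- ===== Notes on version B (the rewrite author's own statement) =====
-- stated objective: faster
-- what changed: B replaces A's exponentially recursive fibo_dp and A's self-recursion by Fibonacci values generated with iterated addition and a plain while-loop over the shrinking list, skipping the bogus Fibonacci candidate 0.
-- crash fix: On lists ending in 1 whose greedy Fibonacci-jump trajectory stalls on a nonempty suffix (e.g. [0,0,0,1]), A recurses forever on the unchanged list via the wrap-around check A[-1]==1 for the bogus Fibonacci candidate 0 and raises RecursionError; B returns count+1 (no jump possible) there. — e.g. on self_frog_jump([0, 0, 0, 1], 0): A raises RecursionError, B returns 1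
import Mathlib
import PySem

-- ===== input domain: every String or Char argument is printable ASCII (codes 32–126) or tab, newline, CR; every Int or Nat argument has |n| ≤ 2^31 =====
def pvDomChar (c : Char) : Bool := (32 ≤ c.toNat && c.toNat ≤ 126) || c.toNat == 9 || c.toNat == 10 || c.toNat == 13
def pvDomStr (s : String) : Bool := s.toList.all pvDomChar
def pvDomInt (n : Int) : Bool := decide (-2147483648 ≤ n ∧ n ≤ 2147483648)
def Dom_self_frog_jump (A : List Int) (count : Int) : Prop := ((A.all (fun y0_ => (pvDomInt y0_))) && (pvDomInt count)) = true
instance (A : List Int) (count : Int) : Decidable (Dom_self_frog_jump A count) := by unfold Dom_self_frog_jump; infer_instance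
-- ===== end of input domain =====

-- B replaces A's exponential recursive Fibonacci and self-recursion by iterated-addition
-- Fibonacci and a plain while-loop (objective: faster).

-- ===== PORT A =====
-- fibo_dp: A's naive doubly-recursive Fibonacci.
def fibo_dp : Nat → Int
  | 0 => 0
  | 1 => 1
  | 2 => 1
  | n + 3 => fibo_dp (n + 2) + fibo_dp (n + 1)

-- A's index search: 'i=0; while fibo_dp(i) < len(A): i+=1; if fibo_dp(i)==len(A): i+=1'.
-- The fuel argument only makes the while-loop total; fuel len(A)+3 always suffices.
def fja_loop : Nat → Nat → Nat → Nat
  | 0, i, _ => i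
  | fuel + 1, i, n =>
    if fibo_dp i < (n : Int) then
      fja_loop fuel (if fibo_dp (i + 1) = (n : Int) then i + 2 else i + 1) n
    else i

-- fibo_max_func: scan fibo_array in order, return A[f:] for the first f with A[f-1] == 1
-- (Python indexing incl. the negative wrap-around A[-1] for f = 0, via pyGet?).
def fibo_max_func (A : List Int) : List Int → Option (List Int)
  | [] => none
  | f :: rest =>
    if PySem.List.pyGet? A (f - 1) == some 1 then some (PySem.List.slice A (some f) none)
    else fibo_max_func A rest

-- A's self-recursion, fuel-guarded for totality only (A's Python recurses on the UNCHANGED list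
-- when the 0-candidate's wrap-around check A[-1]==1 fires and then never returns; exactly those
-- inputs are outside Pre_ below, and fuel len+1 suffices on every input inside Pre_).
-- Python's branches 'next_A == -1' and 'next_A == 1' compare a list with an int and are always
-- False; they are ported as skipped.
def fja_main : Nat → List Int → Int → Int
  | 0, _, count => count
  | fuel + 1, A, count =>
    let i := fja_loop (A.length + 3) 0 A.length
    let fibo_array := ((List.range i).map fibo_dp).reverse
    match fibo_max_func A fibo_array with
    | none => count + 1
    | some nextA => fja_main fuel nextA (count + 1)

def self_frog_jump (A : List Int) (count : Int) : Int :=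
  fja_main (A.length + 1) A count

-- ===== PORT B =====
-- Fibonacci values 1,2,3,5,… ≤ n by iterated addition (the inner while of Source B; fuel n+3 suffices).
def fjb_fibs : Nat → Int → Int → Nat → List Int
  | 0, _, _, _ => []
  | fuel + 1, a, b, n => if a ≤ (n : Int) then a :: fjb_fibs fuel b (a + b) n else []

-- the 'while True' jump loop of Source B, fuel-guarded for totality only.
def fjb_main : Nat → List Int → Int → Int
  | 0, _, count => count
  | fuel + 1, A, count =>
    let fibs := fjb_fibs (A.length + 3) 1 2 A.length
    match fibs.reverse.find? (fun f => PySem.List.pyGet? A (f - 1) == some 1) with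
    | none => count + 1
    | some f => fjb_main fuel (PySem.List.slice A (some f) none) (count + 1)

def self_frog_jump_alt (A : List Int) (count : Int) : Int :=
  fjb_main (A.length + 1) A count

-- ===== PRECONDITION & SPEC =====
-- Python A raises (RecursionError) exactly on lists ending in 1 whose greedy Fibonacci-jump
-- trajectory stalls on a nonempty suffix: there the bogus candidate 0 matches via A[-1]==1 and A
-- recurses forever on the unchanged list.  Whether that happens depends on the whole trajectory,
-- so Pre_ evaluates the trajectory with its own independent Nat.fib-based definitions (filter/max
-- over all indices, not a copy of either port's Fibonacci generation or scan); Pre_ excludes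
-- nothing on which A returns.
def pvIsFib (f : Nat) : Bool := (List.range (f + 2)).any (fun k => Nat.fib k == f)
def pvCands (n : Nat) : List Nat := (List.range (n + 1)).filter (fun f => 0 < f && pvIsFib f)
-- the greedy jump: the LARGEST Fibonacci f with 1 ≤ f ≤ |S| and S[f-1] = 1 (last of the ascending candidates)
def pvJump (S : List Int) : Option Nat :=
  ((pvCands S.length).filter (fun f => S[f-1]? == some (1 : Int))).getLast?
-- iterate the greedy jump; true iff it stalls on a nonempty suffix (each jump is ≥ 1, so |A|+1 steps always decide)
def pvRunF : Nat → List Int → Bool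
  | 0, _ => false
  | k + 1, S => if S.isEmpty then false else match pvJump S with | none => true | some f => pvRunF k (S.drop f)
def pvStalls (A : List Int) : Bool := pvRunF (A.length + 1) A

def Pre_self_frog_jump (A : List Int) (count : Int) : Prop :=
  ¬ (pvStalls A = true ∧ A.getLast? = some 1)
instance (A : List Int) (count : Int) : Decidable (Pre_self_frog_jump A count) := by
  unfold Pre_self_frog_jump; infer_instance
def pvWitness_self_frog_jump : List Int × Int := ([1, 0, 1, 0], 0)

-- On lists ending in 1 whose greedy trajectory stalls on a nonempty suffix, A recurses forever on
-- the unchanged list (RecursionError); B returns count+1 there (no jump possible).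
def Raises_self_frog_jump (A : List Int) (count : Int) : Prop :=
  pvStalls A = true ∧ A.getLast? = some 1
instance (A : List Int) (count : Int) : Decidable (Raises_self_frog_jump A count) := by
  unfold Raises_self_frog_jump; infer_instance
def pvRaiseWitness_self_frog_jump : List Int × Int := ([0, 0, 0, 1], 0)
def pvRaiseWitnessOut_self_frog_jump : Int := 1

def Spec_self_frog_jump (A : List Int) (count : Int) (out : Int) : Prop := out = self_frog_jump_alt A count
instance (A : List Int) (count : Int) (out : Int) : Decidable (Spec_self_frog_jump A count out) := by unfold Spec_self_frog_jump; infer_instance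

-- ===== CLAIM (what is proved, stated in full; the proofs are below) =====
def Claim_equal_self_frog_jump : Prop := ∀ (A : List Int) (count : Int), Dom_self_frog_jump A count → Pre_self_frog_jump A count → Spec_self_frog_jump A count (self_frog_jump A count)
def Claim_raises_self_frog_jump : Prop := (∀ (A : List Int) (count : Int), Dom_self_frog_jump A count → Raises_self_frog_jump A count → ¬ Pre_self_frog_jump A count) ∧ (Dom_self_frog_jump (pvRaiseWitness_self_frog_jump.1) (pvRaiseWitness_self_frog_jump.2) ∧ Raises_self_frog_jump (pvRaiseWitness_self_frog_jump.1) (pvRaiseWitness_self_frog_jump.2) ∧ self_frog_jump_alt (pvRaiseWitness_self_frog_jump.1) (pvRaiseWitness_self_frog_jump.2) = pvRaiseWitnessOut_self_frog_jump)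

-- ===== LEMMAS AND PROOFS =====

lemma fib_add (k : Nat) (h : 1 ≤ k) : fibo_dp (k + 2) = fibo_dp (k + 1) + fibo_dp k := by
  obtain ⟨m, rfl⟩ : ∃ m, k = m + 1 := ⟨k - 1, by omega⟩
  rfl

lemma fib_pos (k : Nat) (h : 1 ≤ k) : 1 ≤ fibo_dp k := by
  match k, h with
  | 1, _ => simp [fibo_dp]
  | 2, _ => simp [fibo_dp]
  | m + 3, _ =>
    have h1 := fib_pos (m + 2) (by omega)
    have h2 := fib_pos (m + 1) (by omega)
    rw [fibo_dp]; omega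

lemma fib_ge (k : Nat) : (k : Int) - 1 ≤ fibo_dp k := by
  induction k using Nat.strong_induction_on with
  | _ k ih =>
    match k with
    | 0 => simp [fibo_dp]
    | 1 => simp [fibo_dp]
    | 2 => simp [fibo_dp]
    | m + 3 =>
      have h1 := ih (m + 2) (by omega)
      have h2 := fib_pos (m + 1) (by omega)
      rw [fibo_dp]
      push_cast at *
      omega

lemma fja_loop_ge : ∀ (fuel i n : Nat), i ≤ fja_loop fuel i n := by
  intro fuel
  induction fuel with
  | zero => intro i n; simp [fja_loop]
  | succ f ih =>
    intro i n
    rw [fja_loop]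
    split
    · split
      · exact le_trans (by omega) (ih (i + 2) n)
      · exact le_trans (by omega) (ih (i + 1) n)
    · exact le_rfl

lemma fja_loop_stop (fuel i n : Nat) (h : ¬ fibo_dp i < (n : Int)) : fja_loop fuel i n = i := by
  cases fuel <;> simp [fja_loop, h]

-- lockstep simulation of A's index loop and B's value loop over the Fibonacci sequence
lemma sim : ∀ (fuelA fuelB k n : Nat), 2 ≤ k → fibo_dp k ≠ (n : Int) →
    n + 2 ≤ fuelA + k → n + 2 ≤ fuelB + k →
    (List.range' k (fja_loop fuelA k n - k)).map fibo_dp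
      = fjb_fibs fuelB (fibo_dp k) (fibo_dp (k + 1)) n := by
  intro fuelA
  induction fuelA with
  | zero =>
    intro fuelB k n hk hne hA hB
    have hstop : fja_loop 0 k n = k := rfl
    have hgt : ¬ fibo_dp k ≤ (n : Int) := by
      have := fib_ge k
      intro hle
      have : fibo_dp k < (n : Int) := lt_of_le_of_ne hle hne
      omega
    rw [hstop]
    simp only [Nat.sub_self, List.range'_zero, List.map_nil]
    cases fuelB with
    | zero => rfl
    | succ fb => rw [fjb_fibs]; simp [hgt]
  | succ fa ih =>
    intro fuelB k n hk hne hA hB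
    by_cases hlt : fibo_dp k < (n : Int)
    · -- k ≤ n, so both fuels are ≥ 2
      have hkn : k ≤ n := by have := fib_ge k; omega
      have hfb2 : 2 ≤ fuelB := by omega
      obtain ⟨fb, rfl⟩ : ∃ fb, fuelB = fb + 2 := ⟨fuelB - 2, by omega⟩
      have hle : fibo_dp k ≤ (n : Int) := le_of_lt hlt
      by_cases heq : fibo_dp (k + 1) = (n : Int)
      · -- A jumps by two and stops; B emits exactly two more values
        have hrec : fibo_dp (k + 2) = fibo_dp (k + 1) + fibo_dp k := fib_add k (by omega)
        have h1k : 1 ≤ fibo_dp k := fib_pos k (by omega)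
        have hgt2 : ¬ fibo_dp (k + 2) < (n : Int) := by rw [hrec, heq]; omega
        have hloop : fja_loop (fa + 1) k n = k + 2 := by
          rw [fja_loop]
          simp only [hlt, if_true, heq, if_true]
          exact fja_loop_stop fa (k + 2) n hgt2
        rw [hloop]
        have h2 : k + 2 - k = 2 := by omega
        rw [h2]
        have hle2 : fibo_dp (k + 1) ≤ (n : Int) := le_of_eq heq
        rw [fjb_fibs, if_pos hle, fjb_fibs, if_pos hle2]
        have hrhs : fjb_fibs fb (fibo_dp k + fibo_dp (k + 1))
            (fibo_dp (k + 1) + (fibo_dp k + fibo_dp (k + 1))) n = [] := by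
          cases fb with
          | zero => rfl
          | succ fb' =>
            rw [fjb_fibs, if_neg]
            rw [show fibo_dp k + fibo_dp (k + 1) = fibo_dp (k + 2) from by rw [hrec]; ring]
            rw [hrec, heq]; omega
        rw [hrhs]
        have hr2 : List.range' k 2 = [k, k + 1] := by
          rw [List.range'_succ, List.range'_succ, List.range'_zero]
        rw [hr2]
        simp
      · -- both advance by one; induction
        have hloop : fja_loop (fa + 1) k n = fja_loop fa (k + 1) n := by
          rw [fja_loop]; simp [hlt, heq]
        rw [hloop]
        obtain ⟨fb1, hfb1⟩ : ∃ m, fb + 2 = m + 1 := ⟨fb + 1, rfl⟩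
        rw [hfb1, fjb_fibs]
        simp only [hle, if_true]
        have hrec : fibo_dp k + fibo_dp (k + 1) = fibo_dp (k + 1 + 1) := by
          rw [fib_add k (by omega)]; ring
        rw [hrec]
        have hih := ih fb1 (k + 1) n (by omega) heq (by omega) (by omega)
        have hge : k + 1 ≤ fja_loop fa (k + 1) n := fja_loop_ge fa (k + 1) n
        have hsplit : List.range' k (fja_loop fa (k + 1) n - k)
            = k :: List.range' (k + 1) (fja_loop fa (k + 1) n - (k + 1)) := by
          have : fja_loop fa (k + 1) n - k = (fja_loop fa (k + 1) n - (k + 1)) + 1 := by omega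
          rw [this, List.range'_succ]
        rw [hsplit, List.map_cons, hih]
    · have hstop : fja_loop (fa + 1) k n = k := fja_loop_stop (fa + 1) k n hlt
      have hgt : ¬ fibo_dp k ≤ (n : Int) := fun hc => hlt (lt_of_le_of_ne hc hne)
      rw [hstop]
      simp only [Nat.sub_self, List.range'_zero, List.map_nil]
      cases fuelB with
      | zero => rfl
      | succ fb => rw [fjb_fibs]; simp [hgt]

lemma array_eq_ge2 (n : Nat) (h : 2 ≤ n) :
    (List.range (fja_loop (n + 3) 0 n)).map fibo_dp = 0 :: 1 :: fjb_fibs (n + 3) 1 2 n := by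
  have h0 : fibo_dp 0 < (n : Int) := by simp [fibo_dp]; omega
  have h1ne : fibo_dp 1 ≠ (n : Int) := by simp [fibo_dp]; omega
  have h1lt : fibo_dp 1 < (n : Int) := by simp [fibo_dp]; omega
  have h2ne : fibo_dp 2 ≠ (n : Int) := by simp [fibo_dp]; omega
  have hl1 : fja_loop (n + 3) 0 n = fja_loop (n + 2) 1 n := by
    rw [fja_loop]; simp [h0, h1ne]
  have hl2 : fja_loop (n + 2) 1 n = fja_loop (n + 1) 2 n := by
    rw [fja_loop]; simp [h1lt, h2ne]
  have hsim := sim (n + 1) (n + 3) 2 n (by omega) h2ne (by omega) (by omega)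
  have hge : 2 ≤ fja_loop (n + 1) 2 n := fja_loop_ge (n + 1) 2 n
  rw [hl1, hl2, List.range_eq_range']
  set L := fja_loop (n + 1) 2 n with hL
  obtain ⟨m, hm⟩ : ∃ m, L = m + 2 := ⟨L - 2, by omega⟩
  have hm' : m = L - 2 := by omega
  rw [hm]
  have hr : List.range' 0 (m + 2) = 0 :: 1 :: List.range' 2 m := by
    rw [show m + 2 = (m + 1) + 1 from rfl, List.range'_succ, List.range'_succ]
  rw [hr]
  simp only [List.map_cons]
  rw [hm', hsim]
  norm_num [show fibo_dp 0 = (0 : Int) from rfl, show fibo_dp 1 = (1 : Int) from rfl,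
    show fibo_dp 2 = (1 : Int) from rfl, show fibo_dp (2 + 1) = (2 : Int) from rfl]

lemma fmax_eq (A : List Int) (L : List Int) :
    fibo_max_func A L
      = (L.find? (fun f => PySem.List.pyGet? A (f - 1) == some 1)).map
          (fun f => PySem.List.slice A (some f) none) := by
  induction L with
  | nil => rfl
  | cons f rest ih =>
    rw [fibo_max_func, List.find?]
    by_cases hp : (PySem.List.pyGet? A (f - 1) == some 1) = true
    · simp [hp]
    · simp only [Bool.not_eq_true] at hp
      simp [hp, ih]

lemma one_mem_fibs (n : Nat) (h : 1 ≤ n) : (1 : Int) ∈ fjb_fibs (n + 3) 1 2 n := by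
  rw [fjb_fibs]
  have : (1 : Int) ≤ (n : Int) := by exact_mod_cast h
  simp [this]

-- ===== the bridge between B's Fibonacci list and Pre_'s candidate list =====

lemma natfib_ge (k : Nat) : k ≤ Nat.fib k + 1 := by
  induction k using Nat.strong_induction_on with
  | _ k ih =>
    match k with
    | 0 => decide
    | 1 => decide
    | 2 => decide
    | m + 3 =>
      have h1 := ih (m + 2) (by omega)
      have h2 : 0 < Nat.fib (m + 1) := Nat.fib_pos.mpr (by omega)
      have h1' : m + 2 ≤ Nat.fib (m + 1 + 1) + 1 := h1
      rw [Nat.fib_add_two]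
      omega

lemma fjb_mem_lb : ∀ (fuel : Nat) (a b : Int) (n : Nat) (x : Int), 0 < a → a < b →
    x ∈ fjb_fibs fuel a b n → a ≤ x := by
  intro fuel
  induction fuel with
  | zero => intro a b n x _ _ hx; simp [fjb_fibs] at hx
  | succ f ih =>
    intro a b n x ha hab hx
    rw [fjb_fibs] at hx
    by_cases hle : a ≤ (n : Int)
    · simp only [hle, if_true, List.mem_cons] at hx
      rcases hx with rfl | hx
      · exact le_rfl
      · have := ih b (a + b) n x (by omega) (by omega) hx
        omega
    · simp [hle] at hx

lemma fjb_pairwise : ∀ (fuel : Nat) (a b : Int) (n : Nat), 0 < a → a < b →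
    (fjb_fibs fuel a b n).Pairwise (· < ·) := by
  intro fuel
  induction fuel with
  | zero => intro a b n _ _; simp [fjb_fibs]
  | succ f ih =>
    intro a b n ha hab
    rw [fjb_fibs]
    by_cases hle : a ≤ (n : Int)
    · simp only [hle, if_true]
      refine List.pairwise_cons.mpr ⟨?_, ih b (a + b) n (by omega) (by omega)⟩
      intro x hx
      have := fjb_mem_lb f b (a + b) n x (by omega) (by omega) hx
      omega
    · simp [hle]

lemma fib_mem_fjb : ∀ (fuel k m n : Nat), 2 ≤ k → k ≤ m → Nat.fib m ≤ n → m - k < fuel →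
    ((Nat.fib m : Int)) ∈ fjb_fibs fuel (Nat.fib k) (Nat.fib (k + 1)) n := by
  intro fuel
  induction fuel with
  | zero => intro k m n _ _ _ h; omega
  | succ f ih =>
    intro k m n hk hkm hmn hfuel
    have hle : ((Nat.fib k : Int)) ≤ (n : Int) := by
      have : Nat.fib k ≤ Nat.fib m := Nat.fib_mono hkm
      exact_mod_cast le_trans this hmn
    rw [fjb_fibs, if_pos hle]
    by_cases heq : k = m
    · subst heq; exact List.mem_cons_self
    · refine List.mem_cons_of_mem _ ?_
      have hsum : (Nat.fib k : Int) + (Nat.fib (k + 1) : Int) = ((Nat.fib (k + 2) : Nat) : Int) := by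
        rw [Nat.fib_add_two]; push_cast; ring
      rw [hsum]
      exact ih (k + 1) m n (by omega) (by omega) hmn (by omega)

lemma fjb_mem_isfib : ∀ (fuel k : Nat) (n : Nat) (x : Int), 2 ≤ k →
    x ∈ fjb_fibs fuel (Nat.fib k) (Nat.fib (k + 1)) n →
    ∃ m, 2 ≤ m ∧ Nat.fib m ≤ n ∧ x = (Nat.fib m : Int) := by
  intro fuel
  induction fuel with
  | zero => intro k n x _ hx; simp [fjb_fibs] at hx
  | succ f ih =>
    intro k n x hk hx
    rw [fjb_fibs] at hx
    by_cases hle : ((Nat.fib k : Int)) ≤ (n : Int)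
    · simp only [hle, if_true, List.mem_cons] at hx
      rcases hx with rfl | hx
      · exact ⟨k, hk, by exact_mod_cast hle, rfl⟩
      · have hsum : (Nat.fib k : Int) + (Nat.fib (k + 1) : Int) = ((Nat.fib (k + 2) : Nat) : Int) := by
          rw [Nat.fib_add_two]; push_cast; ring
        rw [hsum] at hx
        exact ih (k + 1) n x (by omega) hx
    · simp [hle] at hx

-- two strictly increasing lists with the same members are equal
lemma eq_of_pairwise_lt_of_mem_iff : ∀ (l₁ l₂ : List Int), l₁.Pairwise (· < ·) →
    l₂.Pairwise (· < ·) → (∀ x, x ∈ l₁ ↔ x ∈ l₂) → l₁ = l₂ := by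
  intro l₁
  induction l₁ with
  | nil =>
    intro l₂ _ _ hmem
    cases l₂ with
    | nil => rfl
    | cons y t => exact absurd ((hmem y).mpr List.mem_cons_self) (by simp)
  | cons x t ih =>
    intro l₂ h₁ h₂ hmem
    cases l₂ with
    | nil => exact absurd ((hmem x).mp List.mem_cons_self) (by simp)
    | cons y t₂ =>
      obtain ⟨hx₁, ht₁⟩ := List.pairwise_cons.mp h₁
      obtain ⟨hy₂, ht₂⟩ := List.pairwise_cons.mp h₂
      have hxy : x = y := by
        have hx : x ∈ y :: t₂ := (hmem x).mp List.mem_cons_self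
        have hy : y ∈ x :: t := (hmem y).mpr List.mem_cons_self
        rcases List.mem_cons.mp hx with h | h
        · exact h
        · rcases List.mem_cons.mp hy with h' | h'
          · exact h'.symm
          · have := hy₂ x h
            have := hx₁ y h'
            omega
      subst hxy
      have : t = t₂ := by
        apply ih t₂ ht₁ ht₂
        intro z
        constructor
        · intro hz
          have hzx : x < z := hx₁ z hz
          rcases List.mem_cons.mp ((hmem z).mp (List.mem_cons_of_mem _ hz)) with h | h
          · omega
          · exact h
        · intro hz
          have hzx : x < z := hy₂ z hz
          rcases List.mem_cons.mp ((hmem z).mpr (List.mem_cons_of_mem _ hz)) with h | h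
          · omega
          · exact h
      rw [this]

lemma mem_cands_map_iff (n : Nat) (x : Int) :
    x ∈ (pvCands n).map (fun f : Nat => (f : Int))
      ↔ ∃ m, 2 ≤ m ∧ Nat.fib m ≤ n ∧ x = (Nat.fib m : Int) := by
  constructor
  · intro hx
    rw [List.mem_map] at hx
    obtain ⟨f, hf, rfl⟩ := hx
    unfold pvCands at hf
    rw [List.mem_filter, List.mem_range] at hf
    obtain ⟨hfn, hpred⟩ := hf
    rw [Bool.and_eq_true, decide_eq_true_eq] at hpred
    obtain ⟨hf0, hfib⟩ := hpred
    rw [pvIsFib, List.any_eq_true] at hfib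
    obtain ⟨k, hk, hfibk⟩ := hfib
    rw [List.mem_range] at hk
    rw [beq_iff_eq] at hfibk
    have hfib := hfibk
    match k, hfib with
    | 0, hfib => rw [Nat.fib_zero] at hfib; omega
    | 1, hfib =>
      exact ⟨2, by omega, by simpa [show Nat.fib 2 = Nat.fib 1 from rfl, hfib] using by omega,
        by rw [show Nat.fib 2 = Nat.fib 1 from rfl, hfib]⟩
    | m + 2, hfib => exact ⟨m + 2, by omega, by omega, by rw [hfib]⟩
  · rintro ⟨m, hm, hmn, rfl⟩
    rw [List.mem_map]
    refine ⟨Nat.fib m, ?_, rfl⟩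
    unfold pvCands
    rw [List.mem_filter, List.mem_range]
    refine ⟨by omega, ?_⟩
    rw [Bool.and_eq_true, decide_eq_true_eq]
    refine ⟨Nat.fib_pos.mpr (by omega), ?_⟩
    rw [pvIsFib, List.any_eq_true]
    refine ⟨m, ?_, by rw [beq_iff_eq]⟩
    rw [List.mem_range]
    have := natfib_ge m
    omega

lemma fjb_eq_cands (n : Nat) :
    fjb_fibs (n + 3) 1 2 n = (pvCands n).map (fun f : Nat => (f : Int)) := by
  apply eq_of_pairwise_lt_of_mem_iff
  · exact fjb_pairwise (n + 3) 1 2 n (by norm_num) (by norm_num)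
  · exact List.Pairwise.map _ (fun a b (h : a < b) => by exact_mod_cast h)
      ((List.pairwise_lt_range).sublist (List.filter_sublist))
  · intro x
    rw [mem_cands_map_iff]
    constructor
    · intro hx
      exact fjb_mem_isfib (n + 3) 2 n x (by norm_num)
        (by simpa [show ((Nat.fib 2 : Nat) : Int) = 1 from rfl,
          show ((Nat.fib 3 : Nat) : Int) = 2 from rfl] using hx)
    · rintro ⟨m, hm, hmn, rfl⟩
      have hb := natfib_ge m
      have := fib_mem_fjb (n + 3) 2 m n (by omega) (by omega) hmn (by omega)
      simpa [show ((Nat.fib 2 : Nat) : Int) = 1 from rfl,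
        show ((Nat.fib 3 : Nat) : Int) = 2 from rfl] using this

lemma find?_reverse_eq_getLast?_filter {α : Type} : ∀ (l : List α) (p : α → Bool),
    l.reverse.find? p = (l.filter p).getLast? := by
  intro l
  induction l with
  | nil => intro p; rfl
  | cons x t ih =>
    intro p
    rw [List.reverse_cons, List.find?_append, ih]
    by_cases hp : p x = true
    · simp only [List.filter_cons, hp, if_true]
      cases h : (t.filter p).getLast? with
      | none =>
        have : t.filter p = [] := List.getLast?_eq_none_iff.mp h
        simp [this, List.find?, hp]
      | some v => simp [h, List.getLast?_cons, List.find?, hp]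
    · simp only [Bool.not_eq_true] at hp
      simp [List.filter_cons, hp, List.find?]

-- B's descending scan of its Fibonacci list computes exactly the greedy jump pvJump
lemma bfind_eq (A : List Int) :
    (fjb_fibs (A.length + 3) 1 2 A.length).reverse.find?
        (fun f => PySem.List.pyGet? A (f - 1) == some 1)
      = (pvJump A).map (fun f : Nat => (f : Int)) := by
  rw [fjb_eq_cands, ← List.map_reverse, List.find?_map,
    find?_reverse_eq_getLast?_filter]
  have hfc : (pvCands A.length).filter
        ((fun f => PySem.List.pyGet? A (f - 1) == some 1) ∘ (fun f : Nat => (f : Int)))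
      = (pvCands A.length).filter (fun f => A[f-1]? == some (1 : Int)) := by
    apply List.filter_congr
    intro f hf
    have hf0 : 0 < f := by
      simp only [pvCands, List.mem_filter, Bool.and_eq_true, decide_eq_true_eq] at hf
      exact hf.2.1
    have hcast : ((f : Int)) - 1 = ((f - 1 : Nat) : Int) := by omega
    simp [Function.comp, hcast, PySem.List.pyGet?_natCast]
  rw [hfc, pvJump]

lemma pvJump_bounds (A : List Int) (f : Nat) (h : pvJump A = some f) :
    0 < f ∧ f ≤ A.length := by
  have hmem : f ∈ (pvCands A.length).filter (fun f => A[f-1]? == some (1 : Int)) :=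
    List.mem_of_getLast? h
  have := (List.mem_filter.mp hmem).1
  simp only [pvCands, List.mem_filter, List.mem_range, Bool.and_eq_true, decide_eq_true_eq] at this
  omega

-- ===== the main lockstep equivalence, threading the no-stall-with-trailing-1 invariant =====
lemma main_eq : ∀ (fuel : Nat) (A : List Int) (count : Int), A.length < fuel →
    ¬ (pvRunF fuel A = true ∧ A.getLast? = some 1) →
    fja_main fuel A count = fjb_main fuel A count := by
  intro fuel
  induction fuel with
  | zero => intro A count h; omega
  | succ f ih =>
    intro A count hlen hpre
    by_cases hA : A = []
    · subst hA
      rw [fja_main, fjb_main]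
      norm_num [fja_loop, fjb_fibs, fibo_dp, fibo_max_func]
    · have hn1 : 1 ≤ A.length := by
        cases A with | nil => exact absurd rfl hA | cons x xs => simp
      rw [fja_main, fjb_main]
      cases hfd : (fjb_fibs (A.length + 3) 1 2 A.length).reverse.find?
          (fun f => PySem.List.pyGet? A (f - 1) == some 1) with
      | none =>
        -- B finds no jump, so the greedy jump pvJump is none too
        have hjnone : pvJump A = none := by
          have := bfind_eq A
          rw [hfd] at this
          cases h : pvJump A with
          | none => rfl
          | some v => rw [h] at this; simp at this
        -- if A ends in 1 this is exactly the excluded stall; otherwise A returns count+1 too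
        have hlast : A.getLast? ≠ some 1 := by
          intro hl
          apply hpre
          refine ⟨?_, hl⟩
          rw [pvRunF, if_neg (by simpa using hA), hjnone]
        have hp0 : PySem.List.pyGet? A (-1) ≠ some 1 := by
          rw [PySem.List.pyGet?_neg_one]; exact hlast
        have hfmax : fibo_max_func A
            (((List.range (fja_loop (A.length + 3) 0 A.length)).map fibo_dp).reverse) = none := by
          rw [fmax_eq]
          by_cases h2 : 2 ≤ A.length
          · rw [array_eq_ge2 A.length h2]
            have hrev : ((0 : Int) :: 1 :: fjb_fibs (A.length + 3) 1 2 A.length).reverse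
                = (fjb_fibs (A.length + 3) 1 2 A.length).reverse ++ [1, 0] := by simp
            rw [hrev, List.find?_append, hfd]
            have hp1 : PySem.List.pyGet? A 0 ≠ some 1 := by
              rw [List.find?_eq_none] at hfd
              have h1mem : (1 : Int) ∈ (fjb_fibs (A.length + 3) 1 2 A.length).reverse := by
                rw [List.mem_reverse]; exact one_mem_fibs A.length hn1
              simpa using hfd 1 h1mem
            have hp0b : (PySem.List.pyGet? A (-1) == some 1) = false := by simp [hp0]
            have hp1b : (PySem.List.pyGet? A 0 == some 1) = false := by simp [hp1]
            simp [List.find?, hp0b, hp1b]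
          · have hn : A.length = 1 := by omega
            rw [hn]
            have harr : (List.range (fja_loop (1 + 3) 0 1)).map fibo_dp = [0, 1] := by decide
            rw [harr]
            have hfibs : fjb_fibs (1 + 3) 1 2 1 = [1] := by decide
            rw [hn, hfibs] at hfd
            have hp1 : (PySem.List.pyGet? A 0 == some 1) = false := by
              simpa [List.find?] using hfd
            have hp0b : (PySem.List.pyGet? A (-1) == some 1) = false := by simp [hp0]
            simp [List.find?, hp0b, hp1]
        rw [hfmax]
      | some v =>
        -- both sides jump to the same suffix
        obtain ⟨g, hg, rfl⟩ : ∃ g, pvJump A = some g ∧ v = (g : Int) := by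
          have := bfind_eq A
          rw [hfd] at this
          cases h : pvJump A with
          | none => rw [h] at this; simp at this
          | some g => rw [h] at this; exact ⟨g, rfl, by simpa using this⟩
        obtain ⟨hg0, hglen⟩ := pvJump_bounds A g hg
        have hfmax : fibo_max_func A
            (((List.range (fja_loop (A.length + 3) 0 A.length)).map fibo_dp).reverse)
            = some (PySem.List.slice A (some (g : Int)) none) := by
          rw [fmax_eq]
          by_cases h2 : 2 ≤ A.length
          · rw [array_eq_ge2 A.length h2]
            have hrev : ((0 : Int) :: 1 :: fjb_fibs (A.length + 3) 1 2 A.length).reverse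
                = (fjb_fibs (A.length + 3) 1 2 A.length).reverse ++ [1, 0] := by simp
            rw [hrev, List.find?_append, hfd]
            simp
          · have hn : A.length = 1 := by omega
            rw [hn]
            have harr : (List.range (fja_loop (1 + 3) 0 1)).map fibo_dp = [0, 1] := by decide
            rw [harr]
            have hfibs : fjb_fibs (1 + 3) 1 2 1 = [1] := by decide
            rw [hn, hfibs] at hfd
            have hp1 : (PySem.List.pyGet? A 0 == some 1) = true := by
              by_cases hc : (PySem.List.pyGet? A 0 == some 1) = true
              · exact hc
              · simp [List.find?, hc] at hfd
            have hv : ((g : Int)) = 1 := by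
              simp [hp1] at hfd
              omega
            rw [hv]
            simp [hp1]
        rw [hfmax]
        have hslice : PySem.List.slice A (some (g : Int)) none = A.drop g :=
          by simpa using PySem.List.slice_from A (Int.natCast_nonneg g)
        show fja_main f (PySem.List.slice A (some (g : Int)) none) (count + 1)
            = fjb_main f (PySem.List.slice A (some (g : Int)) none) (count + 1)
        rw [hslice]
        apply ih
        · have : (A.drop g).length = A.length - g := by simp
          omega
        · -- the invariant is preserved: pvRunF steps with the same jump, and drop preserves getLast?
          intro ⟨hrun, hlast⟩
          apply hpre
          constructor
          · rw [pvRunF, if_neg (by simpa using hA), hg]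
            exact hrun
          · have hne : A.drop g ≠ [] := by
              intro hc
              rw [hc] at hlast
              simp at hlast
            have heq2 : (A.drop g).getLast? = A.getLast? := by
              conv_rhs => rw [← List.take_append_drop g A]
              rw [List.getLast?_append]
              cases hgl : (A.drop g).getLast? with
              | none => exact absurd (List.getLast?_eq_none_iff.mp hgl) hne
              | some w => simp
            rw [← heq2]; exact hlast

-- ===== VERDICT (by name: the statements are the Claim_ definitions above) =====
theorem self_frog_jump_spec : Claim_equal_self_frog_jump := by
  intro A count hdom hpre
  unfold Spec_self_frog_jump self_frog_jump self_frog_jump_alt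
  exact main_eq (A.length + 1) A count (by omega) hpre

@[simp] theorem self_frog_jump_raises : Claim_raises_self_frog_jump := by
  unfold Claim_raises_self_frog_jump
  exact ⟨fun A count _ hr hp => hp hr, by decide⟩
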